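-- pv_equiv track=rewrite | github.com/peterzieba/5Vpld | simulation/makesi.py | make_order
-- ===== SOURCE A (Python) =====
-- def make_order(signal_list):
--     order="ORDER: "
--     blank=0
--     for index,signal in enumerate(signal_list):
--         if signal != '/* */':
--             if blank != 0:
--                 order+="%" + str(blank) + ", "
--                 blank=0
--             order+=signal + ", "
--         else:
--             blank+=1
--     return(order[:-2] + ";\r\n")
-- ===== SOURCE B (Python) =====
-- def make_order(signal_list):
--     # Build a token list first (run-length encoding the blank runs, dropping a
--     # trailing blank run), then assemble the string in one join.
--     tokens = []
--     i, n = 0, len(signal_list)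
--     while i < n:
--         if signal_list[i] == '/* */':
--             j = i
--             while j < n and signal_list[j] == '/* */':
--                 j += 1
--             if j < n:
--                 tokens.append('%' + str(j - i))
--             i = j
--         else:
--             tokens.append(signal_list[i])
--             i += 1
--     s = 'ORDER: ' + ''.join(t + ', ' for t in tokens)
--     return s[:-2] + ';\r\n'
-- ===== Notes on version B (the rewrite author's own statement) =====
-- stated objective: alternative
-- what changed: B first run-length encodes the signal list into a token list (scanning each blank run to its end and dropping a trailing blank run) and then assembles the string with a single join, instead of A's one-pass string accumulation with a pending blank counter flushed before each non-blank signal.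
import Mathlib
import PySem

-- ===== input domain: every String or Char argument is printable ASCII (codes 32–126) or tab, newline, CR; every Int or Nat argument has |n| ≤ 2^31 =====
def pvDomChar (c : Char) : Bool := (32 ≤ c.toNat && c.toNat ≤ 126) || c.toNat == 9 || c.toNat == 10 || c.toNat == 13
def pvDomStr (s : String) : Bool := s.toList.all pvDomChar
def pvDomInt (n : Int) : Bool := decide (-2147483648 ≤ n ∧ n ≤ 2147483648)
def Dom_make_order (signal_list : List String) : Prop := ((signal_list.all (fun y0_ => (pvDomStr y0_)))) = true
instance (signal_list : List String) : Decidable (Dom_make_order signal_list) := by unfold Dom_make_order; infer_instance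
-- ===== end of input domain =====

-- B: builds a token list first (run-length encoding the blank runs, dropping a trailing
-- blank run) and assembles the string with one join — a different decomposition, not faster.

-- ===== PORT A =====
-- A's loop: accumulate the output string directly, flushing a pending blank counter
-- when a non-blank signal appears.  Strings are handled as List Char (PySem.Chars).
def make_order (signal_list : List String) : String :=
  let st := ((PySem.List.enumerate signal_list 0).foldl
    (fun (st : List Char × Int) p =>
      if p.2 ≠ "/* */" then
        let order := if st.2 ≠ 0 then st.1 ++ ('%' :: PySem.Int.toChars st.2) ++ (", ".toList) else st.1
        (order ++ p.2.toList ++ (", ".toList), 0)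
      else (st.1, st.2 + 1))
    ("ORDER: ".toList, 0)).1
  String.ofList (PySem.List.slice st none (some (-2)) ++ (";\r\n".toList))

-- ===== PORT B =====
-- Source B's outer while-loop producing the token list: a blank run is scanned to its end
-- (the inner while = takeWhile/dropWhile) and emitted as one '%<len>' token unless it
-- is the trailing run; a non-blank signal is emitted as itself.
def bToks : List String → List (List Char)
  | [] => []
  | s :: r =>
    if s = "/* */" then
      let run : Nat := 1 + (r.takeWhile (· == "/* */")).length
      let rest := r.dropWhile (· == "/* */")
      if rest.isEmpty then []
      else ('%' :: PySem.Int.toChars (run : Int)) :: bToks rest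
    else s.toList :: bToks r
termination_by l => l.length
decreasing_by
  · simp only [List.length_cons]
    exact Nat.lt_succ_of_le (List.length_dropWhile_le _ _)
  · simp

-- ''.join(t + ', ' for t in tokens)
def bJoin : List (List Char) → List Char
  | [] => []
  | t :: ts => t ++ (", ".toList) ++ bJoin ts

def make_order_alt (signal_list : List String) : String :=
  let s := ("ORDER: ".toList) ++ bJoin (bToks signal_list)
  String.ofList (PySem.List.slice s none (some (-2)) ++ (";\r\n".toList))

-- ===== PRECONDITION & SPEC =====
def Spec_make_order (signal_list : List String) (out : String) : Prop := out = make_order_alt signal_list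
instance (signal_list : List String) (out : String) : Decidable (Spec_make_order signal_list out) := by unfold Spec_make_order; infer_instance

-- ===== CLAIM (what is proved, stated in full; the proofs are below) =====
def Claim_equal_make_order : Prop := ∀ (signal_list : List String), Dom_make_order signal_list → Spec_make_order signal_list (make_order signal_list)

-- ===== LEMMAS AND PROOFS =====

-- Token-list characterisation of A's loop: the pending blank counter b is flushed
-- before each non-blank signal.
def auxT (b : Int) : List String → List (List Char)
  | [] => []
  | s :: r =>
    if s ≠ "/* */" then
      (if b ≠ 0 then [('%' :: PySem.Int.toChars b), s.toList] else [s.toList]) ++ auxT 0 r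
    else auxT (b + 1) r

theorem loopA_char (l : List String) : ∀ (n : Int) (order : List Char) (b : Int),
    ((PySem.List.enumerate l n).foldl
      (fun (st : List Char × Int) p =>
        if p.2 ≠ "/* */" then
          let order := if st.2 ≠ 0 then st.1 ++ ('%' :: PySem.Int.toChars st.2) ++ (", ".toList) else st.1
          (order ++ p.2.toList ++ (", ".toList), 0)
        else (st.1, st.2 + 1))
      (order, b)).1 = order ++ bJoin (auxT b l) := by
  induction l with
  | nil => intro n order b; simp [PySem.List.enumerate_nil, auxT, bJoin]
  | cons s r ih =>
    intro n order b
    rw [PySem.List.enumerate_cons, List.foldl_cons]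
    by_cases hs : s = "/* */"
    · simp only [hs, auxT, ne_eq, not_true_eq_false, if_false]
      exact ih (n + 1) order (b + 1)
    · by_cases hb : b = 0
      · simp only [auxT, hs, hb, ne_eq, not_false_eq_true, if_true, if_false, not_true_eq_false]
        rw [ih]
        simp [bJoin]
      · simp only [auxT, hs, hb, ne_eq, not_false_eq_true, if_true]
        rw [ih]
        simp [bJoin]

-- Entering a blank run with a positive pending counter b: the whole run collapses to
-- one '%' token (unless the run is trailing).
theorem auxT_run (l : List String) : ∀ (b : Int), 0 < b →
    auxT b l =
      (if (l.dropWhile (· == "/* */")).isEmpty then []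
       else ('%' :: PySem.Int.toChars (b + ((l.takeWhile (· == "/* */")).length : Int))) ::
              auxT 0 (l.dropWhile (· == "/* */"))) := by
  induction l with
  | nil => intro b _; simp [auxT]
  | cons s r ih =>
    intro b hb
    by_cases hs : s = "/* */"
    · simp only [auxT, hs, ne_eq, not_true_eq_false, if_false]
      rw [ih (b + 1) (by omega)]
      simp only [List.dropWhile_cons, List.takeWhile_cons, beq_self_eq_true, if_true,
        List.length_cons]
      have : b + 1 + ((r.takeWhile (· == "/* */")).length : Int)
           = b + (((r.takeWhile (· == "/* */")).length + 1 : Nat) : Int) := by push_cast; ring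
      rw [this]
    · have hbne : b ≠ 0 := by omega
      simp only [auxT, hs, hbne, ne_eq, not_false_eq_true, if_true,
        List.dropWhile_cons, List.takeWhile_cons]
      have hsb : (s == "/* */") = false := by simpa using hs
      simp [hsb, auxT, hs]

theorem auxT_eq_bToks : ∀ (n : Nat) (l : List String), l.length ≤ n → auxT 0 l = bToks l := by
  intro n
  induction n with
  | zero =>
    intro l hl
    have : l = [] := List.eq_nil_of_length_eq_zero (Nat.le_zero.mp hl)
    simp [this, auxT, bToks]
  | succ n ih =>
    intro l hl
    match l with
    | [] => simp [auxT, bToks]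
    | s :: r =>
      by_cases hs : s = "/* */"
      · simp only [auxT, hs, ne_eq, not_true_eq_false, if_false]
        rw [auxT_run r (0 + 1) (by omega)]
        rw [bToks]
        simp only [if_true]
        by_cases he : (r.dropWhile (· == "/* */")).isEmpty
        · simp [he]
        · simp only [he, if_false]
          have hlen : (r.dropWhile (· == "/* */")).length ≤ n := by
            have h1 := List.length_dropWhile_le (· == "/* */") r
            simp only [List.length_cons] at hl
            omega
          rw [ih _ hlen]
          have : (0 : Int) + 1 + ((r.takeWhile (· == "/* */")).length : Int)
               = ((1 + (r.takeWhile (· == "/* */")).length : Nat) : Int) := by push_cast; ring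
          rw [this]
      · simp only [auxT, bToks, hs, ne_eq, not_false_eq_true, if_true, if_false]
        have hlen : r.length ≤ n := by simp only [List.length_cons] at hl; omega
        rw [ih r hlen]
        simp

-- ===== VERDICT (by name: the statement is the Claim_ definition above) =====
theorem make_order_spec : Claim_equal_make_order := by
  intro signal_list _
  unfold Spec_make_order make_order make_order_alt
  rw [loopA_char signal_list 0 ("ORDER: ".toList) 0,
      auxT_eq_bToks signal_list.length signal_list (le_refl _)]
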